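-- pv_equiv track=rewrite | github.com/everysoftware/algorithms-course | src/dp2/application/manchkin_max_score.py | manchkin
-- ===== SOURCE A (Python) =====
-- def manchkin(
--     budget: int, strength: list[int], gold: list[int], monster: list[int]
-- ) -> int:
--     n, m, k = len(strength), len(gold), len(monster)
--     dp = [[0 for _ in range(budget + 1)] for _ in range(n + 1)]
--
--     for i in range(1, n + 1):
--         for j in range(1, budget + 1):
--             if gold[i - 1] <= j:
--                 dp[i][j] = max(
--                     dp[i - 1][j], strength[i - 1] + dp[i - 1][j - gold[i - 1]]
--                 )
--             else:
--                 dp[i][j] = dp[i - 1][j]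
--
--     max_strength = dp[n][budget]
--     monsters = 0
--     for i in range(k):
--         if monster[i] <= max_strength:
--             monsters += 1
--
--     return monsters
-- ===== SOURCE B (Python) =====
-- def manchkin(budget, strength, gold, monster):
--     # Two sparse phases instead of a full table: (1) walk top-down collecting, per item
--     # level, the set of remaining-budget values actually reachable from (n, budget);
--     # (2) compute best strengths bottom-up only for those states, keeping one dict per level.
--     n = len(strength)
--     needed = [set() for _ in range(n + 1)]
--     needed[n].add(budget)
--     for i in reversed(range(1, n + 1)):
--         for j in needed[i]:
--             if j > 0:
--                 needed[i - 1].add(j)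
--                 if gold[i - 1] <= j:
--                     needed[i - 1].add(j - gold[i - 1])
--     prev = {}
--     for j in needed[0]:
--         prev[j] = 0
--     for i in range(1, n + 1):
--         cur = {}
--         for j in needed[i]:
--             if j <= 0:
--                 cur[j] = 0
--             else:
--                 r = prev[j]
--                 if gold[i - 1] <= j:
--                     r = max(r, strength[i - 1] + prev[j - gold[i - 1]])
--                 cur[j] = r
--         prev = cur
--     top = prev[budget]
--     return sum(1 for m in monster if m <= top)
-- ===== Notes on version B (the rewrite author's own statement) =====
-- stated objective: faster
-- what changed: B replaces A's bottom-up (n+1)x(budget+1) table (every cell filled unconditionally) by two sparse passes: a top-down walk collecting the per-level sets of remaining-budget values actually reachable from (n,budget), then a bottom-up value pass over only those states (one dict per level); intended as faster by computing only reachable states (measured 34-277x on a timing run's rungs; worst case matches A's O(n*budget)).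
import Mathlib
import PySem

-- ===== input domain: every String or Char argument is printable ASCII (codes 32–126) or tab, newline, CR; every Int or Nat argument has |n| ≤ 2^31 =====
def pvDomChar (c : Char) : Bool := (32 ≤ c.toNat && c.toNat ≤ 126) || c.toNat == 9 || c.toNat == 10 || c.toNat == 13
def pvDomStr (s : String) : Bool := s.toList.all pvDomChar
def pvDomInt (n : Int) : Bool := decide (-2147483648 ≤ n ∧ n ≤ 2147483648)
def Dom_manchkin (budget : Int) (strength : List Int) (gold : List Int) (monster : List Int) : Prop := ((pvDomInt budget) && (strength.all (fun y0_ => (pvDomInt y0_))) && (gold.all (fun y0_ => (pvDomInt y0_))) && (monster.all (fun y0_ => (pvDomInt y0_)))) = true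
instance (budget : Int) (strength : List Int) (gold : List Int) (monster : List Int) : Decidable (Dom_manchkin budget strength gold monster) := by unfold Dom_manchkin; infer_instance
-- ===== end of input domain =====

-- B replaces A's bottom-up (n+1)×(budget+1) table by two sparse passes: a top-down reachability
-- walk collecting, per item level, the set of remaining-budget values reachable from (n, budget),
-- then a bottom-up value pass over only those states (one dict per level).

-- ===== PORT A =====
-- Python's dp is a preallocated (n+1)-row table whose row i is filled in place from row i-1;
-- here the table starts as [zrow] and each filled row is appended: the same reads (dp[i-1][..])
-- and the same written values, so the resulting table is Python's final table.
def manchkin (budget : Int) (strength : List Int) (gold : List Int) (monster : List Int) : Int :=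
  let n : Int := strength.length
  let k : Int := monster.length
  let zrow : List Int := (PySem.List.pyRange 0 (budget + 1) 1).map (fun _ => (0 : Int))
  let table : List (List Int) :=
    (PySem.List.pyRange 1 (n + 1) 1).foldl (fun tab i =>
      let prev : List Int := PySem.List.pyGetD tab (i - 1) []
      let row : List Int :=
        (PySem.List.pyRange 1 (budget + 1) 1).foldl (fun row j =>
          PySem.List.pySetD row j
            (if PySem.List.pyGetD gold (i - 1) 0 ≤ j then
               max (PySem.List.pyGetD prev j 0)
                 (PySem.List.pyGetD strength (i - 1) 0 +
                   PySem.List.pyGetD prev (j - PySem.List.pyGetD gold (i - 1) 0) 0)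
             else PySem.List.pyGetD prev j 0)) zrow
      tab ++ [row]) [zrow]
  let maxStrength : Int := PySem.List.pyGetD (PySem.List.pyGetD table n []) budget 0
  (PySem.List.pyRange 0 k 1).foldl (fun monsters i =>
    if PySem.List.pyGetD monster i 0 ≤ maxStrength then monsters + 1 else monsters) 0

-- ===== PORT B =====
-- needed[i-1] built from needed[i] (Python's inner 'for j in needed[i]' loop, from an empty set)
def pvExpand (gold : List Int) (i : Int) (nd : PySem.Set Int) : PySem.Set Int :=
  nd.foldl (fun s j =>
    if 0 < j then
      let s1 := PySem.Set.add s j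
      if PySem.List.pyGetD gold (i - 1) 0 ≤ j then
        PySem.Set.add s1 (j - PySem.List.pyGetD gold (i - 1) 0)
      else s1
    else s) PySem.Set.empty

-- Python's needed list, built back to front: the loop 'for i in reversed(range(1, n + 1))'
-- computes needed[i-1] from the most recently computed set needed[i]; the accumulator holds
-- [needed i-1, …, needed n], so the result is [needed 0, …, needed n].
def pvPhase1 (budget : Int) (gold : List Int) (n : ℕ) : List (PySem.Set Int) :=
  ((PySem.List.pyRange 1 ((n : Int) + 1) 1).reverse).foldl
    (fun acc i => pvExpand gold i (acc.headD PySem.Set.empty) :: acc)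
    [PySem.Set.ofList [budget]]

-- one bottom-up level: cur[j] for every j in needed[i] (Python's body sets cur[j] in both branches)
def pvLevel (strength gold : List Int) (i : Int) (prev : PySem.Dict Int Int)
    (nd : PySem.Set Int) : PySem.Dict Int Int :=
  nd.foldl (fun cur j =>
    cur.insert j
      (if j ≤ 0 then 0
       else
         if PySem.List.pyGetD gold (i - 1) 0 ≤ j then
           max (prev.getD j 0)
             (PySem.List.pyGetD strength (i - 1) 0 +
               prev.getD (j - PySem.List.pyGetD gold (i - 1) 0) 0)
         else prev.getD j 0)) PySem.Dict.empty

def manchkin_alt (budget : Int) (strength : List Int) (gold : List Int) (monster : List Int) : Int :=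
  let n := strength.length
  let nds := pvPhase1 budget gold n
  let prev0 := (nds.headD PySem.Set.empty).foldl
    (fun (d : PySem.Dict Int Int) j => d.insert j 0) PySem.Dict.empty
  let fin := (nds.drop 1).foldl
    (fun (st : ℕ × PySem.Dict Int Int) nd =>
      (st.1 + 1, pvLevel strength gold (st.1 : Int) st.2 nd)) (1, prev0)
  let top := fin.2.getD budget 0
  monster.foldl (fun acc m => if m ≤ top then acc + 1 else acc) 0

-- ===== PRECONDITION & SPEC =====
-- Pre_ excludes exactly the inputs on which the Python A raises IndexError: a negative budget
-- (dp's rows are empty, dp[n][budget] fails), and, when budget ≥ 1, gold shorter than strength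
-- (gold[i-1] fails) or a negative gold cost among the first len(strength) entries (the index
-- j - gold[i-1] runs past the end of a row).
def Pre_manchkin (budget : Int) (strength : List Int) (gold : List Int) (monster : List Int) : Prop :=
  0 ≤ budget ∧
    (budget = 0 ∨ (strength.length ≤ gold.length ∧ ∀ g ∈ gold.take strength.length, 0 ≤ g))
instance (budget : Int) (strength : List Int) (gold : List Int) (monster : List Int) : Decidable (Pre_manchkin budget strength gold monster) := by unfold Pre_manchkin; infer_instance

def pvWitness_manchkin : Int × List Int × List Int × List Int := (3, [2, 3], [1, 2], [0, 2, 5, 9])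

def Spec_manchkin (budget : Int) (strength : List Int) (gold : List Int) (monster : List Int) (out : Int) : Prop := out = manchkin_alt budget strength gold monster
instance (budget : Int) (strength : List Int) (gold : List Int) (monster : List Int) (out : Int) : Decidable (Spec_manchkin budget strength gold monster out) := by unfold Spec_manchkin; infer_instance

-- ===== CLAIM (what is proved, stated in full; the proofs are below) =====
def Claim_equal_manchkin : Prop := ∀ (budget : Int) (strength : List Int) (gold : List Int) (monster : List Int), Dom_manchkin budget strength gold monster → Pre_manchkin budget strength gold monster → Spec_manchkin budget strength gold monster (manchkin budget strength gold monster)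

-- ===== LEMMAS AND PROOFS =====

-- the common recurrence both programs compute: pvF i j = A's dp[i][j] = Source B's best(i, j)
def pvF (strength gold : List Int) : ℕ → Int → Int
  | 0, _ => 0
  | i + 1, j =>
    if j ≤ 0 then 0
    else if PySem.List.pyGetD gold (i : Int) 0 ≤ j then
      max (pvF strength gold i j)
        (PySem.List.pyGetD strength (i : Int) 0 +
          pvF strength gold i (j - PySem.List.pyGetD gold (i : Int) 0))
    else pvF strength gold i j

lemma pvF_nonpos (strength gold : List Int) (i : ℕ) (j : Int) (hj : j ≤ 0) :
    pvF strength gold i j = 0 := by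
  cases i with
  | zero => rfl
  | succ i => rw [pvF, if_pos hj]

-- ---- B side: phase 1 produces the level sets pvLev, phase 2 computes pvF on them ----

-- needed[n - m] (distance m below the top level n)
def pvLev (budget : Int) (gold : List Int) (n : ℕ) : ℕ → PySem.Set Int
  | 0 => PySem.Set.ofList [budget]
  | m + 1 => pvExpand gold ((n : Int) - (m : Int)) (pvLev budget gold n m)

-- [pvLev m, pvLev (m-1), …, pvLev 0]
def pvStack (budget : Int) (gold : List Int) (n : ℕ) : ℕ → List (PySem.Set Int)
  | 0 => [pvLev budget gold n 0]
  | m + 1 => pvLev budget gold n (m + 1) :: pvStack budget gold n m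

lemma pvStack_headD (budget : Int) (gold : List Int) (n m : ℕ) :
    (pvStack budget gold n m).headD PySem.Set.empty = pvLev budget gold n m := by
  cases m <;> rfl

lemma pvPhase1_aux (budget : Int) (gold : List Int) (n : ℕ) :
    ∀ k : ℕ, k ≤ n →
      (((PySem.List.pyRange 1 ((k : Int) + 1) 1).reverse).foldl
        (fun acc i => pvExpand gold i (acc.headD PySem.Set.empty) :: acc)
        (pvStack budget gold n (n - k))) = pvStack budget gold n n := by
  intro k
  induction k with
  | zero =>
    intro _
    rw [show ((0:ℕ):Int) + 1 = 1 by norm_num, PySem.List.pyRange_one_eq_nil (by omega)]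
    rfl
  | succ k ih =>
    intro hk
    have hr : PySem.List.pyRange 1 (((k:ℕ)+1 : Int) + 1) 1
        = PySem.List.pyRange 1 ((k : Int) + 1) 1 ++ [(((k+1:ℕ)):Int)] := by
      rw [PySem.List.pyRange_one_succ_right (by omega)]; push_cast; ring_nf
    rw [show (((k+1:ℕ)):Int) + 1 = ((k:ℕ)+1 : Int) + 1 by push_cast; ring, hr,
      List.reverse_append]
    simp only [List.reverse_cons, List.reverse_nil, List.nil_append, List.singleton_append,
      List.foldl_cons]
    have hstep : pvExpand gold (((k+1:ℕ)):Int)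
          ((pvStack budget gold n (n - (k+1))).headD PySem.Set.empty) :: pvStack budget gold n (n - (k+1))
        = pvStack budget gold n (n - k) := by
      rw [pvStack_headD]
      have hnk : n - k = (n - (k+1)) + 1 := by omega
      rw [hnk, pvStack, pvLev]
      have hc : ((n : Int) - ((n - (k+1) : ℕ) : Int)) = (((k+1:ℕ)):Int) := by omega
      rw [hc]
    rw [hstep]
    exact ih (by omega)

lemma pvPhase1_eq (budget : Int) (gold : List Int) (n : ℕ) :
    pvPhase1 budget gold n = pvStack budget gold n n := by
  have h := pvPhase1_aux budget gold n n le_rfl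
  rw [Nat.sub_self] at h
  unfold pvPhase1
  exact h

-- membership persists through the expand fold, and every needed successor is added
lemma pvExpand_mono (gold : List Int) (i : Int) (x : Int) :
    ∀ (l : List Int) (s : PySem.Set Int), x ∈ s →
      x ∈ l.foldl (fun s j =>
        if 0 < j then
          let s1 := PySem.Set.add s j
          if PySem.List.pyGetD gold (i - 1) 0 ≤ j then
            PySem.Set.add s1 (j - PySem.List.pyGetD gold (i - 1) 0)
          else s1
        else s) s := by
  intro l
  induction l with
  | nil => intro s hs; exact hs
  | cons a l ih =>
    intro s hs
    simp only [List.foldl_cons]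
    apply ih
    beta_reduce
    by_cases h0 : 0 < a
    · simp only [if_pos h0]
      by_cases hg : PySem.List.pyGetD gold (i - 1) 0 ≤ a
      · rw [if_pos hg]
        exact (PySem.Set.mem_add _ _ _).mpr (Or.inl ((PySem.Set.mem_add _ _ _).mpr (Or.inl hs)))
      · rw [if_neg hg]
        exact (PySem.Set.mem_add _ _ _).mpr (Or.inl hs)
    · rwa [if_neg h0]

lemma pvExpand_mem (gold : List Int) (i : Int) (j : Int) (h0 : 0 < j) :
    ∀ (l : List Int) (s : PySem.Set Int), j ∈ l →
      j ∈ l.foldl (fun s j =>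
        if 0 < j then
          let s1 := PySem.Set.add s j
          if PySem.List.pyGetD gold (i - 1) 0 ≤ j then
            PySem.Set.add s1 (j - PySem.List.pyGetD gold (i - 1) 0)
          else s1
        else s) s
      ∧ (PySem.List.pyGetD gold (i - 1) 0 ≤ j →
          j - PySem.List.pyGetD gold (i - 1) 0 ∈ l.foldl (fun s j =>
            if 0 < j then
              let s1 := PySem.Set.add s j
              if PySem.List.pyGetD gold (i - 1) 0 ≤ j then
                PySem.Set.add s1 (j - PySem.List.pyGetD gold (i - 1) 0)
              else s1
            else s) s) := by
  intro l
  induction l with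
  | nil => intro s hj; cases hj
  | cons a l ih =>
    intro s hj
    rw [List.mem_cons] at hj
    rcases hj with hj | hj
    · subst hj
      simp only [List.foldl_cons]
      constructor
      · apply pvExpand_mono
        beta_reduce
        rw [if_pos h0]
        by_cases hg : PySem.List.pyGetD gold (i - 1) 0 ≤ j
        · rw [if_pos hg]
          exact (PySem.Set.mem_add _ _ _).mpr (Or.inl ((PySem.Set.mem_add _ _ _).mpr (Or.inr rfl)))
        · rw [if_neg hg]
          exact (PySem.Set.mem_add _ _ _).mpr (Or.inr rfl)
      · intro hg
        apply pvExpand_mono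
        beta_reduce
        rw [if_pos h0, if_pos hg]
        exact (PySem.Set.mem_add _ _ _).mpr (Or.inr rfl)
    · simp only [List.foldl_cons]
      exact ih _ hj

lemma pvLev_closure (budget : Int) (gold : List Int) (n m : ℕ) (j : Int)
    (hj : j ∈ pvLev budget gold n m) (h0 : 0 < j) :
    j ∈ pvLev budget gold n (m + 1)
    ∧ (PySem.List.pyGetD gold ((n : Int) - (m : Int) - 1) 0 ≤ j →
        j - PySem.List.pyGetD gold ((n : Int) - (m : Int) - 1) 0 ∈ pvLev budget gold n (m + 1)) := by
  have h := pvExpand_mem gold ((n : Int) - (m : Int)) j h0 (pvLev budget gold n m) PySem.Set.empty hj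
  exact h

-- a fold of inserts with a value depending only on the key
lemma pvFoldInsert (f : Int → Int) :
    ∀ (l : List Int) (d : PySem.Dict Int Int) (j : Int),
      (j ∈ l ∨ d.getD j 0 = f j) →
      (l.foldl (fun d x => d.insert x (f x)) d).getD j 0 = f j := by
  intro l
  induction l with
  | nil =>
    intro d j h
    rcases h with h | h
    · cases h
    · exact h
  | cons x l ih =>
    intro d j h
    simp only [List.foldl_cons]
    by_cases hx : j = x
    · subst hx
      apply ih
      right
      rw [PySem.Dict.getD_insert, if_pos rfl]
    · rcases h with h | h
      · rw [List.mem_cons] at h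
        rcases h with h | h
        · exact absurd h hx
        · exact ih _ _ (Or.inl h)
      · apply ih
        right
        rw [PySem.Dict.getD_insert, if_neg hx]
        exact h

lemma pvLevelSpec (strength gold : List Int) (budget : Int) (n i' m : ℕ)
    (hm : m + i' + 1 = n) (prev : PySem.Dict Int Int)
    (hp : ∀ j ∈ pvLev budget gold n (m + 1), prev.getD j 0 = pvF strength gold i' j) :
    ∀ j ∈ pvLev budget gold n m,
      (pvLevel strength gold ((i' : Int) + 1) prev (pvLev budget gold n m)).getD j 0
        = pvF strength gold (i' + 1) j := by
  intro j hj
  unfold pvLevel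
  rw [show ((i' : Int) + 1 - 1) = (i' : Int) by ring]
  rw [pvFoldInsert _ _ _ _ (Or.inl hj)]
  by_cases h0 : j ≤ 0
  · rw [if_pos h0, pvF_nonpos strength gold (i' + 1) j h0]
  · rw [if_neg h0]
    have hidx : ((n : Int) - (m : Int) - 1) = (i' : Int) := by
      have : (m : Int) + (i' : Int) + 1 = (n : Int) := by exact_mod_cast hm
      omega
    have hcl := pvLev_closure budget gold n m j hj (by omega)
    rw [hidx] at hcl
    rw [pvF, if_neg h0]
    by_cases hg : PySem.List.pyGetD gold (i' : Int) 0 ≤ j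
    · rw [if_pos hg, if_pos hg, hp j hcl.1, hp _ (hcl.2 hg)]
    · rw [if_neg hg, if_neg hg, hp j hcl.1]

lemma pvPhase2 (strength gold : List Int) (budget : Int) (n : ℕ) :
    ∀ m : ℕ, m + 1 ≤ n → ∀ prev : PySem.Dict Int Int,
      (∀ j ∈ pvLev budget gold n (m + 1), prev.getD j 0 = pvF strength gold (n - m - 1) j) →
      ∀ j ∈ pvLev budget gold n 0,
        (((pvStack budget gold n m).foldl
          (fun (st : ℕ × PySem.Dict Int Int) nd =>
            (st.1 + 1, pvLevel strength gold (st.1 : Int) st.2 nd)) ((n - m : ℕ), prev)).2).getD j 0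
          = pvF strength gold n j := by
  intro m
  induction m with
  | zero =>
    intro hm prev hp j hj
    rw [pvStack]
    simp only [List.foldl_cons, List.foldl_nil]
    have hn0 : (n : ℕ) - 0 = (n - 1) + 1 := by omega
    have hcast : (((n - 0 : ℕ)) : Int) = (((n - 1 : ℕ)) : Int) + 1 := by
      push_cast [hn0]; push_cast; ring
    rw [hcast]
    have := pvLevelSpec strength gold budget n (n - 1) 0 (by omega) prev
      (by intro x hx; rw [show n - 0 - 1 = n - 1 from by omega] at hp; exact hp x hx)
      j hj
    rw [show (n - 1) + 1 = n from by omega] at this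
    exact this
  | succ m ih =>
    intro hm prev hp j hj
    rw [pvStack]
    simp only [List.foldl_cons]
    have hst : ((n - (m + 1) : ℕ)) + 1 = (n - m : ℕ) := by omega
    have hcast : (((n - (m + 1) : ℕ)) : Int) = (((n - m - 2 + 1 : ℕ)) : Int) := by
      congr 1
      omega
    have hprev' : ∀ x ∈ pvLev budget gold n (m + 1),
        (pvLevel strength gold ((n - (m + 1) : ℕ) : Int) prev (pvLev budget gold n (m + 1))).getD x 0
          = pvF strength gold (n - m - 1) x := by
      have hlev := pvLevelSpec strength gold budget n (n - m - 2) (m + 1) (by omega) prev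
        (by intro x hx
            rw [show n - (m + 1) - 1 = n - m - 2 from by omega] at hp
            exact hp x hx)
      rw [show (n - m - 2) + 1 = n - m - 1 from by omega] at hlev
      intro x hx
      have hc2 : ((n - (m + 1) : ℕ) : Int) = ((n - m - 2 : ℕ) : Int) + 1 := by
        have h1 : (n - (m + 1) : ℕ) = (n - m - 2) + 1 := by omega
        rw [h1]; push_cast; ring
      rw [hc2]
      exact hlev x hx
    rw [hst]
    exact ih (by omega) _ hprev' j hj

-- ---- A side: each filled row of the table agrees with pvF ----

def pvVal (d : List Int) (g s j : Int) : Int :=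
  if g ≤ j then max (PySem.List.pyGetD d j 0) (s + PySem.List.pyGetD d (j - g) 0)
  else PySem.List.pyGetD d j 0

lemma pvFillA (bN : ℕ) (d : List Int) (g s : Int) :
    ∀ (t : ℕ), t ≤ bN → ∀ acc : List Int, acc.length = bN + 1 →
      (((PySem.List.pyRange 1 ((t : Int) + 1) 1).foldl
          (fun row j => PySem.List.pySetD row j (pvVal d g s j)) acc).length = bN + 1)
      ∧ ∀ m : ℕ,
          PySem.List.pyGetD ((PySem.List.pyRange 1 ((t : Int) + 1) 1).foldl
            (fun row j => PySem.List.pySetD row j (pvVal d g s j)) acc) (m : Int) 0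
          = if 1 ≤ m ∧ m ≤ t then pvVal d g s (m : Int) else PySem.List.pyGetD acc (m : Int) 0 := by
  intro t
  induction t with
  | zero =>
    intro _ acc hlen
    rw [show ((0:ℕ):Int) + 1 = 1 by norm_num, PySem.List.pyRange_one_eq_nil (by omega)]
    refine ⟨hlen, fun m => ?_⟩
    have : ¬ (1 ≤ m ∧ m ≤ 0) := by omega
    rw [if_neg this]
    rfl
  | succ t ih =>
    intro ht acc hlen
    have hr : PySem.List.pyRange 1 (((t:ℕ)+1 : Int) + 1) 1
        = PySem.List.pyRange 1 ((t : Int) + 1) 1 ++ [(((t+1:ℕ)):Int)] := by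
      rw [PySem.List.pyRange_one_succ_right (by omega)]; push_cast; ring_nf
    rw [show (((t+1:ℕ)):Int) + 1 = ((t:ℕ)+1 : Int) + 1 by push_cast; ring, hr, List.foldl_append]
    obtain ⟨ihlen, ihget⟩ := ih (by omega) acc hlen
    simp only [List.foldl_cons, List.foldl_nil]
    have hlt : t + 1 < (List.foldl (fun row j => PySem.List.pySetD row j (pvVal d g s j))
        acc (PySem.List.pyRange 1 ((t : Int) + 1) 1)).length := by omega
    refine ⟨by rw [PySem.List.length_pySetD]; exact ihlen, fun m => ?_⟩
    rw [PySem.List.pyGetD_pySetD_natCast _ _ _ _ _ hlt, ihget]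
    by_cases hm : m = t + 1
    · subst hm
      have h1 : ¬ (1 ≤ t+1 ∧ t+1 ≤ t) := by omega
      simp
    · have : (1 ≤ m ∧ m ≤ t+1) ↔ (1 ≤ m ∧ m ≤ t) := by omega
      simp [hm, this]

lemma pvGetD_replicate_zero (m : ℕ) (u : Int) :
    PySem.List.pyGetD (List.replicate m (0 : Int)) u 0 = 0 := by
  unfold PySem.List.pyGetD PySem.List.pyGet? PySem.List.pyIdx?
  split_ifs <;> simp [List.getElem?_replicate] <;> split_ifs <;> rfl

-- A's growing table: after jn outer steps it has jn+1 rows and its last row is pvF jn on [0..bN]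
lemma pvTable (bN : ℕ) (strength gold : List Int)
    (hg : ∀ i : ℕ, i < strength.length → 1 ≤ bN → 0 ≤ PySem.List.pyGetD gold (i : Int) 0) :
    ∀ jn : ℕ, jn ≤ strength.length →
      (((List.range jn).foldl (fun (tab : List (List Int)) (k : ℕ) =>
          tab ++ [(PySem.List.pyRange 1 ((bN : Int) + 1) 1).foldl
            (fun row j => PySem.List.pySetD row j
              (pvVal (PySem.List.pyGetD tab (k : Int) [])
                (PySem.List.pyGetD gold (k : Int) 0)
                (PySem.List.pyGetD strength (k : Int) 0) j))
            (List.replicate (bN + 1) (0 : Int))]) [List.replicate (bN + 1) (0 : Int)]).length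
        = jn + 1)
      ∧ ∃ row : List Int,
        ((List.range jn).foldl (fun (tab : List (List Int)) (k : ℕ) =>
          tab ++ [(PySem.List.pyRange 1 ((bN : Int) + 1) 1).foldl
            (fun row j => PySem.List.pySetD row j
              (pvVal (PySem.List.pyGetD tab (k : Int) [])
                (PySem.List.pyGetD gold (k : Int) 0)
                (PySem.List.pyGetD strength (k : Int) 0) j))
            (List.replicate (bN + 1) (0 : Int))]) [List.replicate (bN + 1) (0 : Int)])[jn]?
          = some row
        ∧ row.length = bN + 1
        ∧ ∀ m : ℕ, m ≤ bN → PySem.List.pyGetD row (m : Int) 0 = pvF strength gold jn (m : Int) := by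
  intro jn
  induction jn with
  | zero =>
    intro _
    refine ⟨rfl, List.replicate (bN + 1) 0, rfl, by simp, fun m _ => ?_⟩
    rw [pvGetD_replicate_zero]
    rfl
  | succ jn ih =>
    intro hjn
    obtain ⟨ihlen, prev, ihlast, ihplen, ihpget⟩ := ih (by omega)
    rw [List.range_succ, List.foldl_append]
    simp only [List.foldl_cons, List.foldl_nil]
    set tab := (List.range jn).foldl (fun (tab : List (List Int)) (k : ℕ) =>
          tab ++ [(PySem.List.pyRange 1 ((bN : Int) + 1) 1).foldl
            (fun row j => PySem.List.pySetD row j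
              (pvVal (PySem.List.pyGetD tab (k : Int) [])
                (PySem.List.pyGetD gold (k : Int) 0)
                (PySem.List.pyGetD strength (k : Int) 0) j))
            (List.replicate (bN + 1) (0 : Int))]) [List.replicate (bN + 1) (0 : Int)] with htab
    have hprev : PySem.List.pyGetD tab ((jn : ℕ) : Int) [] = prev := by
      rw [PySem.List.pyGetD_natCast, List.getD_eq_getElem?_getD, ihlast]
      rfl
    obtain ⟨hflen, hfget⟩ := pvFillA bN prev (PySem.List.pyGetD gold (jn : Int) 0)
      (PySem.List.pyGetD strength (jn : Int) 0) bN le_rfl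
      (List.replicate (bN + 1) 0) (by simp)
    rw [hprev]
    refine ⟨by simp [ihlen], _, ?_, hflen, fun m hm => ?_⟩
    · rw [List.getElem?_append_right (by omega)]
      have : jn + 1 - tab.length = 0 := by omega
      rw [this]
      rfl
    · rw [hfget m]
      by_cases hm1 : 1 ≤ m
      · rw [if_pos ⟨hm1, hm⟩]
        have hbn1 : 1 ≤ bN := by omega
        have hgnn : 0 ≤ PySem.List.pyGetD gold (jn : Int) 0 := hg jn (by omega) hbn1
        unfold pvVal
        have hj0 : ¬ ((m : Int) ≤ 0) := by exact_mod_cast by omega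
        rw [pvF, if_neg hj0]
        by_cases hgj : PySem.List.pyGetD gold (jn : Int) 0 ≤ (m : Int)
        · rw [if_pos hgj, if_pos hgj]
          have e1 : PySem.List.pyGetD prev (m : Int) 0 = pvF strength gold jn (m : Int) :=
            ihpget m hm
          have hd : ((m : Int) - PySem.List.pyGetD gold (jn : Int) 0)
              = ((((m : Int) - PySem.List.pyGetD gold (jn : Int) 0).toNat : ℕ) : Int) := by
            omega
          have e2 : PySem.List.pyGetD prev ((m : Int) - PySem.List.pyGetD gold (jn : Int) 0) 0
              = pvF strength gold jn ((m : Int) - PySem.List.pyGetD gold (jn : Int) 0) := by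
            rw [hd]
            apply ihpget
            omega
          rw [e1, e2]
        · rw [if_neg hgj, if_neg hgj]
          exact ihpget m hm
      · have hm0 : m = 0 := by omega
        subst hm0
        rw [if_neg (by omega)]
        rw [pvGetD_replicate_zero]
        rw [pvF_nonpos strength gold (jn + 1) ((0:ℕ):Int) (by exact_mod_cast le_rfl)]

-- ===== VERDICT (by name: the statement is the Claim_ definition above) =====
theorem manchkin_spec : Claim_equal_manchkin := by
  intro budget strength gold monster hdom hpre
  obtain ⟨hb0, hrest⟩ := hpre
  lift budget to ℕ using hb0 with bN
  unfold Spec_manchkin manchkin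
  simp only []
  have hz : (PySem.List.pyRange 0 ((bN : Int) + 1) 1).map (fun _ => (0 : Int))
      = List.replicate (bN + 1) (0 : Int) := by
    rw [List.map_const', PySem.List.length_pyRange_one]
    norm_num
  rw [hz]
  rw [PySem.List.pyRange_one 1 ((strength.length : Int) + 1)]
  rw [show (((strength.length : Int)) + 1 - 1).toNat = strength.length from by omega]
  rw [List.foldl_map]
  have hfA : (fun (tab : List (List Int)) (k : ℕ) =>
      tab ++
        [List.foldl
            (fun row j =>
              PySem.List.pySetD row j
                (if PySem.List.pyGetD gold ((1 : Int) + ↑k - 1) 0 ≤ j then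
                  max (PySem.List.pyGetD (PySem.List.pyGetD tab ((1 : Int) + ↑k - 1) []) j 0)
                    (PySem.List.pyGetD strength ((1 : Int) + ↑k - 1) 0 +
                      PySem.List.pyGetD (PySem.List.pyGetD tab ((1 : Int) + ↑k - 1) [])
                        (j - PySem.List.pyGetD gold ((1 : Int) + ↑k - 1) 0) 0)
                else PySem.List.pyGetD (PySem.List.pyGetD tab ((1 : Int) + ↑k - 1) []) j 0))
            (List.replicate (bN + 1) (0 : Int))
            (PySem.List.pyRange 1 ((bN : Int) + 1) 1)])
      = (fun (tab : List (List Int)) (k : ℕ) =>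
      tab ++ [(PySem.List.pyRange 1 ((bN : Int) + 1) 1).foldl
            (fun row j => PySem.List.pySetD row j
              (pvVal (PySem.List.pyGetD tab (k : Int) [])
                (PySem.List.pyGetD gold (k : Int) 0)
                (PySem.List.pyGetD strength (k : Int) 0) j))
            (List.replicate (bN + 1) (0 : Int))]) := by
    funext tab k
    have h1 : (1 : Int) + ↑k - 1 = (k : Int) := by ring
    rw [h1]
    rfl
  rw [hfA]
  have hgc : ∀ i : ℕ, i < strength.length → 1 ≤ bN → 0 ≤ PySem.List.pyGetD gold (i : Int) 0 := by
    intro i hi hbn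
    rcases hrest with hb | ⟨hlen, hall⟩
    · exfalso; omega
    · have hig : i < gold.length := by omega
      have : PySem.List.pyGetD gold (i : Int) 0 = gold[i] := by
        rw [PySem.List.pyGetD_natCast, List.getD_eq_getElem?_getD, List.getElem?_eq_getElem hig]
        rfl
      rw [this]
      apply hall
      have hit : i < (List.take strength.length gold).length := by
        simp [List.length_take]; omega
      have : (List.take strength.length gold)[i]'hit = gold[i] := List.getElem_take
      rw [← this]
      exact List.getElem_mem hit
  obtain ⟨htlen, row, hlast, hrlen, hrget⟩ := pvTable bN strength gold hgc strength.length le_rfl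
  have hprev : PySem.List.pyGetD ((List.range strength.length).foldl
      (fun (tab : List (List Int)) (k : ℕ) =>
      tab ++ [(PySem.List.pyRange 1 ((bN : Int) + 1) 1).foldl
            (fun row j => PySem.List.pySetD row j
              (pvVal (PySem.List.pyGetD tab (k : Int) [])
                (PySem.List.pyGetD gold (k : Int) 0)
                (PySem.List.pyGetD strength (k : Int) 0) j))
            (List.replicate (bN + 1) (0 : Int))]) [List.replicate (bN + 1) (0 : Int)])
      ((strength.length : ℕ) : Int) [] = row := by
    rw [PySem.List.pyGetD_natCast, List.getD_eq_getElem?_getD, hlast]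
    rfl
  rw [hprev]
  have hmsA : PySem.List.pyGetD row ((bN : ℕ) : Int) 0 = pvF strength gold strength.length (bN : Int) :=
    hrget bN le_rfl
  rw [hmsA]
  -- B side
  have hB : manchkin_alt (bN : Int) strength gold monster
      = monster.foldl (fun acc m =>
          if m ≤ pvF strength gold strength.length (bN : Int) then acc + 1 else acc) 0 := by
    unfold manchkin_alt
    simp only []
    rw [pvPhase1_eq]
    rcases hsn : strength.length with _ | n'
    · simp only [pvStack, List.headD_cons, List.drop_succ_cons, List.drop_nil, List.foldl_nil]
      have h0 : ((pvLev (bN : Int) gold 0 0).foldl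
          (fun (d : PySem.Dict Int Int) j => d.insert j 0) PySem.Dict.empty).getD (bN : Int) 0
          = (0 : Int) := by
        apply pvFoldInsert (fun _ => (0 : Int))
        right
        rw [PySem.Dict.getD_empty]
      rw [h0]
      rfl
    · have hdrop : (pvStack (bN : Int) gold (n' + 1) (n' + 1)).drop 1
          = pvStack (bN : Int) gold (n' + 1) n' := by
        rw [pvStack]
        rfl
      have hhead : (pvStack (bN : Int) gold (n' + 1) (n' + 1)).headD PySem.Set.empty
          = pvLev (bN : Int) gold (n' + 1) (n' + 1) := pvStack_headD _ _ _ _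
      rw [hdrop, hhead]
      have hp0 : ∀ j ∈ pvLev (bN : Int) gold (n' + 1) (n' + 1),
          ((pvLev (bN : Int) gold (n' + 1) (n' + 1)).foldl
            (fun (d : PySem.Dict Int Int) j => d.insert j 0) PySem.Dict.empty).getD j 0
          = pvF strength gold ((n' + 1) - n' - 1) j := by
        intro j _
        rw [show (n' + 1) - n' - 1 = 0 from by omega]
        apply pvFoldInsert (fun _ => (0 : Int))
        right
        rw [PySem.Dict.getD_empty]
      have hfin := pvPhase2 strength gold (bN : Int) (n' + 1) n' (by omega) _ hp0
        (bN : Int) (by rw [pvLev]; exact List.mem_singleton.mpr rfl)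
      rw [show ((n' + 1) - n' : ℕ) = 1 from by omega] at hfin
      rw [hfin]
  rw [hB]
  exact PySem.List.foldl_pyRange_zero_pyGetD' monster 0
    (fun (acc : Int) (x : Int) =>
      if x ≤ pvF strength gold strength.length (bN : Int) then acc + 1 else acc) 0
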